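-- pv_equiv track=rewrite | github.com/marco0560/codira | src/codira/query/context.py | _normalize_snippet_lines
-- ===== SOURCE A (Python) =====
-- def _normalize_snippet_lines(lines: list[str], limit: int) -> list[str]:
--     """
--     Normalize snippet lines for readable deterministic display.
--
--     Parameters
--     ----------
--     lines : list[str]
--         Raw snippet lines.
--     limit : int
--         Maximum number of normalized lines to retain.
--
--     Returns
--     -------
--     list[str]
--         Snippet lines with trailing whitespace removed, edge blanks trimmed,
--         and repeated blank lines collapsed.
--     """
--     normalized: list[str] = []
--     previous_blank = False
--
--     for raw_line in lines:
--         line = raw_line.rstrip()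
--         is_blank = line == ""
--
--         if is_blank and previous_blank:
--             continue
--
--         normalized.append(line)
--         previous_blank = is_blank
--
--     while normalized and normalized[0] == "":
--         normalized.pop(0)
--
--     while normalized and normalized[-1] == "":
--         normalized.pop()
--
--     return normalized[:limit]
-- ===== SOURCE B (Python) =====
-- def _normalize_snippet_lines(lines: list[str], limit: int) -> list[str]:
--     """Rstrip up front, walk blank runs with an index loop (one '' per run),
--     trim at most one edge blank each side, then cap with a slice."""
--     stripped = [line.rstrip() for line in lines]
--     n = len(stripped)
--     collapsed: list[str] = []
--     i = 0
--     while i < n: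
--         if stripped[i] == "":
--             collapsed.append("")
--             while i < n and stripped[i] == "":
--                 i += 1
--         else:
--             collapsed.append(stripped[i])
--             i += 1
--     if collapsed and collapsed[0] == "":
--         collapsed = collapsed[1:]
--     if collapsed and collapsed[-1] == "":
--         collapsed = collapsed[:-1]
--     return collapsed[:limit]
-- ===== Notes on version B (the rewrite author's own statement) =====
-- stated objective: alternative
-- what changed: Replaces the previous_blank flag loop plus two pop-while trim loops by: rstrip all lines first, then a run-skipping traversal that emits one '' per blank run, then removal of at most one edge blank per side (sound because no two blanks are adjacent after collapsing), then a slice.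
import Mathlib
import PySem

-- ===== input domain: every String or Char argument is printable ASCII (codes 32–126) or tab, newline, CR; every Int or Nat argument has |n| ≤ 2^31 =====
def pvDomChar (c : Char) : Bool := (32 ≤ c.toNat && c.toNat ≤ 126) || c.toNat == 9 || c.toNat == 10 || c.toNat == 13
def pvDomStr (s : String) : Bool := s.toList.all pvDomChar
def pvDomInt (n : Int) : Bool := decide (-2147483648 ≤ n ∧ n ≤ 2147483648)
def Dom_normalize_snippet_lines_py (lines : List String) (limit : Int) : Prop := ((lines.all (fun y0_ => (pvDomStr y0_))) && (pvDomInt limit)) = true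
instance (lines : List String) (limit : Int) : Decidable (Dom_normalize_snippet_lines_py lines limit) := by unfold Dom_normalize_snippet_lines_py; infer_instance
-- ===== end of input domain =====

-- B replaces A's previous_blank flag loop and two pop-while edge loops by a run-skipping
-- traversal (one "" per blank run) plus removal of at most one edge blank per side (alternative
-- decomposition, same cost).

-- ===== PORT A =====
-- 'while normalized and normalized[0] == "": normalized.pop(0)' — drop leading "" one at a time
def aPopLead : List String → List String
  | [] => []
  | x :: xs => if x = "" then aPopLead xs else x :: xs

def normalize_snippet_lines_py (lines : List String) (limit : Int) : List String :=
  let st := lines.foldl (fun (st : List String × Bool) raw =>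
      let line := PySem.Str.rstrip raw
      let is_blank : Bool := line == ""
      if is_blank && st.2 then st
      else (st.1 ++ [line], is_blank)) (([] : List String), false)
  let t1 := aPopLead st.1
  -- 'while normalized and normalized[-1] == "": normalized.pop()' — the same pop loop run
  -- from the back, transcribed as the leading-pop loop on the reversed list
  let t2 := (aPopLead t1.reverse).reverse
  PySem.List.slice t2 none (some limit)   -- normalized[:limit]

-- ===== PORT B =====
-- Source B's outer while: emit the current line; on a blank, the inner while skips the rest of the
-- blank run (structural transcription of the index loop: dropWhile = the inner 'i += 1' loop)
def altCollapse : List String → List String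
  | [] => []
  | x :: xs =>
    if x = "" then "" :: altCollapse (xs.dropWhile (fun s => s == ""))
    else x :: altCollapse xs
termination_by l => l.length
decreasing_by
  · have := List.length_dropWhile_le (fun s => s == "") xs
    simp only [List.length_cons]; omega
  · simp

def normalize_snippet_lines_py_alt (lines : List String) (limit : Int) : List String :=
  let stripped := lines.map PySem.Str.rstrip
  let collapsed := altCollapse stripped
  let c1 := if collapsed.head? = some "" then collapsed.tail else collapsed   -- collapsed[1:]
  let c2 := if c1.getLast? = some "" then c1.dropLast else c1                 -- collapsed[:-1]
  PySem.List.slice c2 none (some limit)                                       -- collapsed[:limit]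

-- ===== PRECONDITION & SPEC =====
def Spec_normalize_snippet_lines_py (lines : List String) (limit : Int) (out : List String) : Prop := out = normalize_snippet_lines_py_alt lines limit
instance (lines : List String) (limit : Int) (out : List String) : Decidable (Spec_normalize_snippet_lines_py lines limit out) := by unfold Spec_normalize_snippet_lines_py; infer_instance

-- ===== CLAIM (what is proved, stated in full; the proofs are below) =====
def Claim_equal_normalize_snippet_lines_py : Prop := ∀ (lines : List String) (limit : Int), Dom_normalize_snippet_lines_py lines limit → Spec_normalize_snippet_lines_py lines limit (normalize_snippet_lines_py lines limit)

-- ===== LEMMAS AND PROOFS =====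

-- accumulator-free form of A's loop over the already-stripped lines
def loopC : List String → Bool → List String
  | [], _ => []
  | x :: xs, b => if x == "" && b then loopC xs b else x :: loopC xs (x == "")

theorem foldl_eq_loopC (xs : List String) (acc : List String) (b : Bool) :
    (xs.foldl (fun (st : List String × Bool) raw =>
      let line := PySem.Str.rstrip raw
      let is_blank : Bool := line == ""
      if is_blank && st.2 then st
      else (st.1 ++ [line], is_blank)) (acc, b)).1
    = acc ++ loopC (xs.map PySem.Str.rstrip) b := by
  induction xs generalizing acc b with
  | nil => simp [loopC]
  | cons x xs ih =>
    rw [List.foldl_cons, List.map_cons]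
    change (List.foldl _
        (if ((PySem.Str.rstrip x == "") && b) = true then (acc, b)
         else (acc ++ [PySem.Str.rstrip x], PySem.Str.rstrip x == "")) xs).1 = _
    by_cases h : (PySem.Str.rstrip x == "") && b
    · rw [if_pos h, ih, loopC, if_pos h]
    · rw [if_neg h, ih, loopC, if_neg h, List.append_assoc, List.singleton_append]

theorem loopC_true_dropWhile (xs : List String) :
    loopC (xs.dropWhile (fun s => s == "")) false = loopC xs true := by
  induction xs with
  | nil => rfl
  | cons x xs ih =>
    by_cases h : x = ""
    · subst h
      simp only [List.dropWhile_cons, loopC, beq_self_eq_true, Bool.and_true, if_true]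
      simpa using ih
    · simp [loopC, h]

theorem altCollapse_eq_loopC (xs : List String) : altCollapse xs = loopC xs false := by
  induction xs using altCollapse.induct with
  | case1 => rw [altCollapse]; rfl
  | case2 xs ih =>
    rw [altCollapse, if_pos rfl, ih, loopC_true_dropWhile]
    rw [loopC]
    simp
  | case3 x xs hx ih =>
    have hb : (x == "") = false := by simpa using hx
    rw [altCollapse, if_neg hx, ih, loopC, hb]
    simp

-- no two adjacent blank lines
def noAdj (l : List String) : Prop := ∀ i : Nat, l[i]? = some "" → l[i+1]? ≠ some ""

theorem noAdj_cons (x : String) (l : List String) :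
    noAdj (x :: l) ↔ (x = "" → l.head? ≠ some "") ∧ noAdj l := by
  constructor
  · intro h
    refine ⟨fun hx => ?_, fun i hi => ?_⟩
    · have := h 0 (by simp [hx])
      simpa [List.getElem?_cons_succ, ← List.head?_eq_getElem?] using this
    · have := h (i+1) (by simpa using hi)
      simpa using this
  · rintro ⟨h1, h2⟩ i hi
    cases i with
    | zero =>
      simp only [List.getElem?_cons_zero, Option.some.injEq] at hi
      subst hi
      simpa [List.getElem?_cons_succ, ← List.head?_eq_getElem?] using h1 rfl
    | succ j =>
      simp only [List.getElem?_cons_succ] at hi ⊢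
      exact h2 j hi

theorem head?_dropWhile_blank (xs : List String) :
    (xs.dropWhile (fun s => s == "")).head? ≠ some "" := by
  induction xs with
  | nil => simp
  | cons x xs ih =>
    by_cases h : x = ""
    · simpa [List.dropWhile_cons, h] using ih
    · simp [h]

theorem head?_altCollapse_ne (ys : List String) (h : ys.head? ≠ some "") :
    (altCollapse ys).head? ≠ some "" := by
  cases ys with
  | nil => simp [altCollapse]
  | cons y ys =>
    have hy : y ≠ "" := by simpa using h
    rw [altCollapse]
    simp [hy]

theorem noAdj_altCollapse (xs : List String) : noAdj (altCollapse xs) := by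
  induction xs using altCollapse.induct with
  | case1 => intro i hi; rw [altCollapse] at hi; simp at hi
  | case2 xs ih =>
    rw [altCollapse, if_pos rfl, noAdj_cons]
    exact ⟨fun _ => head?_altCollapse_ne _ (head?_dropWhile_blank xs), ih⟩
  | case3 x xs hx ih =>
    rw [altCollapse, if_neg hx, noAdj_cons]
    exact ⟨fun h => absurd h hx, ih⟩

theorem noAdj_tail (l : List String) (h : noAdj l) : noAdj l.tail := by
  intro i hi
  rw [List.getElem?_tail] at hi ⊢
  exact h (i+1) hi

theorem noAdj_reverse (l : List String) (h : noAdj l) : noAdj l.reverse := by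
  intro i hi hcontra
  have hi1 : i + 1 < l.length := by
    by_contra hlt
    rw [List.getElem?_eq_none (by simpa using Nat.le_of_not_lt hlt)] at hcontra
    simp at hcontra
  have hlen : i < l.length := by omega
  rw [List.getElem?_reverse hlen] at hi
  rw [List.getElem?_reverse (by simpa using hi1)] at hcontra
  have hj : l.length - 1 - (i+1) + 1 = l.length - 1 - i := by omega
  exact h (l.length - 1 - (i+1)) hcontra (by rw [hj]; exact hi)

theorem aPopLead_of_noAdj (l : List String) (h : noAdj l) :
    aPopLead l = if l.head? = some "" then l.tail else l := by
  cases l with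
  | nil => rfl
  | cons x xs =>
    by_cases hx : x = ""
    · subst hx
      have hxs : xs.head? ≠ some "" := by
        have := h 0 (by simp)
        simpa [List.getElem?_cons_succ, ← List.head?_eq_getElem?] using this
      simp only [aPopLead, List.head?_cons, List.tail_cons, if_true]
      cases xs with
      | nil => rfl
      | cons y ys =>
        have hy : y ≠ "" := by simpa using hxs
        simp [aPopLead, hy]
    · simp [aPopLead, hx]

theorem reverse_tail_reverse (l : List String) : l.reverse.tail.reverse = l.dropLast := by
  induction l using List.reverseRecOn with
  | nil => rfl
  | append_singleton xs x ih => simp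

theorem normalize_snippet_lines_py_eq (lines : List String) (limit : Int) :
    normalize_snippet_lines_py lines limit = normalize_snippet_lines_py_alt lines limit := by
  unfold normalize_snippet_lines_py normalize_snippet_lines_py_alt
  simp only []
  rw [foldl_eq_loopC, List.nil_append, ← altCollapse_eq_loopC]
  set c := altCollapse (lines.map PySem.Str.rstrip) with hc
  have hna : noAdj c := noAdj_altCollapse _
  rw [aPopLead_of_noAdj c hna]
  set t1 := if c.head? = some "" then c.tail else c with ht1
  have hna1 : noAdj t1 := by
    rw [ht1]; split
    · exact noAdj_tail c hna
    · exact hna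
  rw [aPopLead_of_noAdj t1.reverse (noAdj_reverse t1 hna1)]
  rw [List.head?_reverse]
  split
  · rw [reverse_tail_reverse]
  · rw [List.reverse_reverse]

-- ===== VERDICT (by name: the statement is the Claim_ definition above) =====
theorem normalize_snippet_lines_py_spec : Claim_equal_normalize_snippet_lines_py := by
  intro lines limit _
  unfold Spec_normalize_snippet_lines_py
  exact normalize_snippet_lines_py_eq lines limit
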